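-- pv_equiv track=rewrite | github.com/subodhss23/python_small_problems | spin_around_touch_ground.py | spin_around
-- ===== SOURCE A (Python) =====
-- def spin_around(lst):
-- 	angle = 0
-- 	for i in lst:
-- 		if i == "right":
-- 			angle+=90
-- 		elif i == "left":
-- 			angle-=90
-- 	absangle = abs(angle)
-- 	turns = absangle/360
-- 	print (int(turns))
-- 	return int(turns)
-- ===== SOURCE B (Python) =====
-- def spin_around(lst):
-- 	def quarters(lo, hi):
-- 		if hi - lo == 0:
-- 			return 0
-- 		if hi - lo == 1:
-- 			t = lst[lo]
-- 			return 1 if t == "right" else (-1 if t == "left" else 0)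
-- 		mid = (lo + hi) // 2
-- 		return quarters(lo, mid) + quarters(mid, hi)
-- 	result = abs(quarters(0, len(lst))) // 4
-- 	print(result)
-- 	return result
-- ===== Notes on version B (the rewrite author's own statement) =====
-- stated objective: alternative
-- what changed: Replaces A's linear if/elif accumulator loop in degrees by a divide-and-conquer recursion over index ranges that combines net quarter-turns of the two halves, then abs(quarters)//4; correct because the net turn of a concatenation is the sum of the halves' net turns.
import Mathlib
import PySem

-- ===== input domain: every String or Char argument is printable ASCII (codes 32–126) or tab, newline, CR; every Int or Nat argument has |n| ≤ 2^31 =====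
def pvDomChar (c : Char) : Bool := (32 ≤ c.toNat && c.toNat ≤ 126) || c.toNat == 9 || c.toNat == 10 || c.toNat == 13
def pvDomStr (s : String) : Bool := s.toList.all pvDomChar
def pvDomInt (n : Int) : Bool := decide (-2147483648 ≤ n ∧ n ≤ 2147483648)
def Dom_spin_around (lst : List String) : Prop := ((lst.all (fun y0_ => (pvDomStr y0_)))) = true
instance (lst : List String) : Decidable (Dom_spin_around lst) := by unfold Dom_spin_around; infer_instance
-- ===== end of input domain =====

-- B replaces A's linear if/elif degree accumulator by a divide-and-conquer recursion
-- combining net quarter-turns of the two halves, then abs//4; equivalence is about the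
-- RETURN value only (both Pythons also print it).

-- ===== PORT A =====
-- A accumulates `angle` over the list, then turns = int(abs(angle)/360); the float
-- division of a nonnegative exact int by 360 truncated by int() equals floor division,
-- ported as PySem.Int.floordiv (exact on the stated domain).
def spin_around (lst : List String) : Int :=
  let angle := lst.foldl (fun angle i =>
    if i = "right" then angle + 90
    else if i = "left" then angle - 90
    else angle) 0
  let absangle := |angle|
  PySem.Int.floordiv absangle 360

-- ===== PORT B =====
-- Source B's quarters(lo, hi) recurses on the index range [lo, hi) of lst, splitting at the
-- midpoint; ported as a recursion on the corresponding sublist, split at length/2.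
def pvQuarters : List String → Int
  | [] => 0
  | [t] => if t = "right" then 1 else if t = "left" then -1 else 0
  | a :: b :: rest =>
      let l := a :: b :: rest
      let mid := l.length / 2
      pvQuarters (l.take mid) + pvQuarters (l.drop mid)
termination_by l => l.length
decreasing_by
  all_goals simp [List.length_take]; omega

def spin_around_alt (lst : List String) : Int :=
  let result := PySem.Int.floordiv |pvQuarters lst| 4
  result

-- ===== PRECONDITION & SPEC =====
def Spec_spin_around (lst : List String) (out : Int) : Prop := out = spin_around_alt lst
instance (lst : List String) (out : Int) : Decidable (Spec_spin_around lst out) := by unfold Spec_spin_around; infer_instance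

-- ===== CLAIM (what is proved, stated in full; the proofs are below) =====
def Claim_equal_spin_around : Prop := ∀ (lst : List String), Dom_spin_around lst → Spec_spin_around lst (spin_around lst)

-- ===== LEMMAS AND PROOFS =====

-- the divide-and-conquer quarter-turn count equals #right − #left
theorem pvQuarters_eq (lst : List String) :
    pvQuarters lst = (lst.count "right" : Int) - (lst.count "left" : Int) := by
  fun_induction pvQuarters lst with
  | case1 => simp
  | case2 => simp
  | case3 _ => simp
  | case4 t h1 h2 => simp [h1, h2]
  | case5 a b rest _l _mid ih2 ih1 =>
    rw [show _l = a :: b :: rest from rfl,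
        show _mid = (a :: b :: rest).length / 2 from rfl] at ih2 ih1 ⊢
    rw [ih2, ih1]
    have key : ∀ (s : String),
        ((a :: b :: rest).count s)
          = ((a :: b :: rest).take ((a :: b :: rest).length / 2)).count s
          + ((a :: b :: rest).drop ((a :: b :: rest).length / 2)).count s := by
      intro s
      conv_lhs => rw [← List.take_append_drop ((a :: b :: rest).length / 2) (a :: b :: rest)]
      rw [List.count_append]
    rw [key "right", key "left"]
    push_cast
    ring

-- A's loop accumulator equals 90 * (#right − #left) plus the initial value.
theorem spin_angle_eq (lst : List String) (a : Int) :
    lst.foldl (fun angle i =>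
      if i = "right" then angle + 90
      else if i = "left" then angle - 90
      else angle) a
    = a + 90 * ((lst.count "right" : Int) - (lst.count "left" : Int)) := by
  induction lst generalizing a with
  | nil => simp
  | cons x xs ih =>
    simp only [List.foldl_cons, ih]
    by_cases hr : x = "right"
    · simp [hr]; ring
    · by_cases hl : x = "left"
      · simp [hl]; ring
      · simp [hr, hl]

theorem floordiv_ninety (q : Int) :
    PySem.Int.floordiv (90 * q) 360 = PySem.Int.floordiv q 4 := by
  rw [PySem.Int.floordiv_eq_ediv_of_pos (by norm_num),
      PySem.Int.floordiv_eq_ediv_of_pos (by norm_num)]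
  have : (360 : Int) = 90 * 4 := by norm_num
  rw [this, Int.mul_ediv_mul_of_pos _ _ (by norm_num : (0:Int) < 90)]

-- ===== VERDICT (by name: the statement is the Claim_ definition above) =====
theorem spin_around_spec : Claim_equal_spin_around := by
  intro lst _
  unfold Spec_spin_around spin_around spin_around_alt
  simp only [spin_angle_eq, pvQuarters_eq, zero_add, abs_mul]
  have h90 : |(90 : Int)| = 90 := by norm_num
  rw [h90, floordiv_ninety]
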